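-- pv_equiv track=rewrite | github.com/mckenn0n/haar_wavelet | haar_one.py | restore_haar
-- ===== SOURCE A (Python) =====
-- def restore_haar(list_to_restore, diff_list):
-- 	new_list = []
-- 	for i in range(len(list_to_restore)):
-- 		new_list.append(list_to_restore[i]+diff_list[0])
-- 		new_list.append(list_to_restore[i]-diff_list[0])
-- 		del diff_list[0]
-- 	if len(diff_list) == 0:
-- 		return new_list, diff_list
-- 	else:
-- 		return (restore_haar(new_list, diff_list))
-- ===== SOURCE B (Python) =====
-- def restore_haar(list_to_restore, diff_list):
--     # Iterative reconstruction with an index into diff_list instead of A's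
--     # recursion with repeated O(m) del diff_list[0]; diff_list is emptied at the
--     # end so the argument is mutated to [] exactly as A leaves it on success.
--     current = list_to_restore
--     pos = 0
--     m = len(diff_list)
--     while pos < m:
--         nxt = []
--         for x in current:
--             d = diff_list[pos]
--             pos += 1
--             nxt.append(x + d)
--             nxt.append(x - d)
--         current = nxt
--     del diff_list[:]
--     return current, diff_list
-- ===== Notes on version B (the rewrite author's own statement) =====
-- stated objective: faster
-- what changed: Replaced A's recursion that repeatedly deletes diff_list[0] (an O(m) list shift per consumed difference) by a single iterative while-loop that walks diff_list with an index and clears it once at the end.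
import Mathlib
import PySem

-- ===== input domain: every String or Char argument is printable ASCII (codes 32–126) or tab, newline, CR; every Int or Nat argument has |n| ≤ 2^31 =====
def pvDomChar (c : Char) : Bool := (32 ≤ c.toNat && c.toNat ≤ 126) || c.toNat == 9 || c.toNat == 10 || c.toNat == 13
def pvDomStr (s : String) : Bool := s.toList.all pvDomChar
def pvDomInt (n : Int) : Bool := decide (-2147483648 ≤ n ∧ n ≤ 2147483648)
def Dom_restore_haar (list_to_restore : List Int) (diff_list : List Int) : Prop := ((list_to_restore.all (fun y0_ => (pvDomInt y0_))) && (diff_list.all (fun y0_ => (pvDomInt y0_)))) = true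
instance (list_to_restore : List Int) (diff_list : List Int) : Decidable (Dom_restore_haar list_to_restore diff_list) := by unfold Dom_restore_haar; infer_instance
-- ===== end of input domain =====

-- B replaces A's recursion (which deletes diff_list[0] at every step, O(m^2)) by a single
-- iterative loop with an index into diff_list, O(m). Equivalence is about the RETURN value;
-- inside Pre_ both leave diff_list mutated to [] in Python.

-- ===== PORT A =====
-- one for-loop pass of A: consume one diff per source element, append x+d and x-d.
-- Python raises IndexError when diff_list is exhausted mid-pass (excluded by Pre_);
-- there the port reads a default 0.
def restore_haar_pass : List Int → List Int → List Int × List Int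
  | [], d => ([], d)
  | x :: xs, d =>
      let v := d.headD 0
      let r := restore_haar_pass xs d.tail
      ((x + v) :: (x - v) :: r.1, r.2)

-- fuel bounds the recursion depth; inside Pre_ it is never exhausted (A's RecursionError
-- on list_to_restore = [] with diff_list ≠ [] is excluded by Pre_).
def restore_haar_rec : Nat → List Int → List Int → List Int × List Int
  | 0, l, d => (l, d)
  | fuel + 1, l, d =>
      let p := restore_haar_pass l d
      if p.2.length = 0 then p else restore_haar_rec fuel p.1 p.2

def restore_haar (list_to_restore : List Int) (diff_list : List Int) : List Int × List Int :=
  restore_haar_rec (diff_list.length + 1) list_to_restore diff_list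

-- ===== PORT B =====
-- the inner for-loop of B: walk current, reading diff_list at pos and advancing pos.
def restore_haar_alt_pass (d : List Int) : List Int → Nat → List Int × Nat
  | [], pos => ([], pos)
  | x :: xs, pos =>
      let v := (PySem.List.pyGet? d (pos : Int)).getD 0  -- diff_list[pos]; out of range = IndexError, excluded by Pre_
      let r := restore_haar_alt_pass d xs (pos + 1)
      ((x + v) :: (x - v) :: r.1, r.2)

-- the while-loop of B, with fuel (never exhausted inside Pre_; Python loops forever on
-- list_to_restore = [] with diff_list ≠ [], excluded by Pre_).
def restore_haar_alt_loop (d : List Int) : Nat → List Int → Nat → List Int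
  | 0, cur, _ => cur
  | fuel + 1, cur, pos =>
      if pos < d.length then
        let r := restore_haar_alt_pass d cur pos
        restore_haar_alt_loop d fuel r.1 r.2
      else cur

def restore_haar_alt (list_to_restore : List Int) (diff_list : List Int) : List Int × List Int :=
  (restore_haar_alt_loop diff_list (diff_list.length + 1) list_to_restore 0, [])

-- ===== PRECONDITION & SPEC =====
-- Pre_ admits exactly the inputs on which Python A returns: diff_list's length is
-- n*(2^k-1) for some number of passes k ≥ 1 (otherwise A raises IndexError or
-- RecursionError); the bound k ≤ m+1 is implied, written for decidability.
def Pre_restore_haar (list_to_restore : List Int) (diff_list : List Int) : Prop :=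
  ∃ k : Nat, k < diff_list.length + 2 ∧ 1 ≤ k ∧
    diff_list.length = list_to_restore.length * (2 ^ k - 1)
instance (list_to_restore : List Int) (diff_list : List Int) : Decidable (Pre_restore_haar list_to_restore diff_list) := by unfold Pre_restore_haar; infer_instance

def pvWitness_restore_haar : List Int × List Int := ([5, 1], [1, 2, 3, -1, 0, 2])

def Spec_restore_haar (list_to_restore : List Int) (diff_list : List Int) (out : List Int × List Int) : Prop := out = restore_haar_alt list_to_restore diff_list
instance (list_to_restore : List Int) (diff_list : List Int) (out : List Int × List Int) : Decidable (Spec_restore_haar list_to_restore diff_list out) := by unfold Spec_restore_haar; infer_instance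

-- ===== CLAIM (what is proved, stated in full; the proofs are below) =====
def Claim_equal_restore_haar : Prop := ∀ (list_to_restore : List Int) (diff_list : List Int), Dom_restore_haar list_to_restore diff_list → Pre_restore_haar list_to_restore diff_list → Spec_restore_haar list_to_restore diff_list (restore_haar list_to_restore diff_list)

-- ===== LEMMAS AND PROOFS =====

theorem pass_len (xs d : List Int) : (restore_haar_pass xs d).1.length = 2 * xs.length := by
  induction xs generalizing d with
  | nil => simp [restore_haar_pass]
  | cons x xs ih => simp [restore_haar_pass, ih]; omega

theorem pass_snd (xs d : List Int) : (restore_haar_pass xs d).2 = d.drop xs.length := by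
  induction xs generalizing d with
  | nil => simp [restore_haar_pass]
  | cons x xs ih => simp [restore_haar_pass, ih, List.drop_tail]

theorem alt_pass_eq (xs d : List Int) (pos : Nat) (h : pos + xs.length ≤ d.length) :
    restore_haar_alt_pass d xs pos = ((restore_haar_pass xs (d.drop pos)).1, pos + xs.length) := by
  induction xs generalizing pos with
  | nil => simp [restore_haar_alt_pass, restore_haar_pass]
  | cons x xs ih =>
      simp only [restore_haar_alt_pass, restore_haar_pass]
      have hp : pos < d.length := by simp at h; omega
      rw [ih (pos + 1) (by simp at h ⊢; omega)]
      have hdrop : d.drop pos = d[pos] :: d.drop (pos + 1) := List.drop_eq_getElem_cons hp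
      have hhead : (PySem.List.pyGet? d (pos : Int)).getD 0 = (d.drop pos).headD 0 := by
        rw [PySem.List.pyGet?_natCast, List.getElem?_eq_getElem hp, hdrop]
        rfl
      have htail : (d.drop pos).tail = d.drop (pos + 1) := by
        simp [List.tail_drop]
      simp only [hhead, htail]
      simp
      omega

theorem main_lemma (d : List Int) (k : Nat) :
    ∀ (fuel : Nat) (cur : List Int) (pos : Nat), k ≤ fuel → 1 ≤ k → pos ≤ d.length →
      d.length - pos = cur.length * (2 ^ k - 1) →
      restore_haar_rec fuel cur (d.drop pos) = (restore_haar_alt_loop d fuel cur pos, []) := by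
  induction k with
  | zero => intro _ _ _ _ h1; omega
  | succ k ih =>
      intro fuel cur pos hfuel _ hpos hlen
      rcases cur with _ | ⟨x, xs⟩
      · -- cur = []: d.length = pos, one A-pass returns ([], []), B exits the loop
        have hdp : pos = d.length := by simp at hlen; omega
        obtain ⟨f, rfl⟩ : ∃ f, fuel = f + 1 := ⟨fuel - 1, by omega⟩
        simp [restore_haar_rec, restore_haar_pass, restore_haar_alt_loop, hdp]
      · set cur := x :: xs with hcur
        have hcl : 1 ≤ cur.length := by simp [hcur]
        have hklt : pos < d.length := by
          have : 1 ≤ 2 ^ (k + 1) - 1 := by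
            have := Nat.one_le_two_pow (n := k + 1); omega
          have := Nat.mul_le_mul hcl this
          omega
        obtain ⟨f, rfl⟩ : ∃ f, fuel = f + 1 := ⟨fuel - 1, by omega⟩
        have hconsume : pos + cur.length ≤ d.length := by
          have h2 : cur.length * 1 ≤ cur.length * (2 ^ (k + 1) - 1) := by
            apply Nat.mul_le_mul_left
            have := Nat.one_le_two_pow (n := k + 1); omega
          omega
        have hpass := alt_pass_eq cur d pos hconsume
        have hlen2 : (restore_haar_pass cur (d.drop pos)).1.length = 2 * cur.length :=
          pass_len cur (d.drop pos)
        have hsnd : (restore_haar_pass cur (d.drop pos)).2 = d.drop (pos + cur.length) := by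
          rw [pass_snd, List.drop_drop, Nat.add_comm]
        rcases Nat.lt_or_ge 1 (k + 1) with hk2 | hk1
        · -- k ≥ 1: A recurses, B loops again; apply ih
          have hk : 1 ≤ k := by omega
          have hrem : d.length - (pos + cur.length) = 2 * cur.length * (2 ^ k - 1) := by
            have hdl : d.length - pos = cur.length * (2 ^ (k + 1) - 1) := hlen
            have hpow : cur.length * (2 ^ (k + 1) - 1) = cur.length + 2 * cur.length * (2 ^ k - 1) := by
              have h1 : 2 ^ (k + 1) = 2 * 2 ^ k := by ring
              have h2 : 1 ≤ 2 ^ k := Nat.one_le_two_pow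
              obtain ⟨t, ht⟩ := Nat.exists_eq_add_of_le h2
              have e1 : 2 ^ (k + 1) - 1 = 2 * t + 1 := by
                rw [h1, ht]; omega
              have e2 : 2 ^ k - 1 = t := by omega
              rw [e1, e2]; ring
            omega
          have hnonempty : (restore_haar_pass cur (d.drop pos)).2.length ≠ 0 := by
            rw [hsnd]
            have : 1 ≤ 2 * cur.length * (2 ^ k - 1) := by
              have := Nat.one_le_two_pow (n := k)
              have hck : 1 ≤ 2 ^ k - 1 := by
                have : 2 ≤ 2 ^ k := by
                  calc 2 = 2 ^ 1 := by norm_num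
                  _ ≤ 2 ^ k := Nat.pow_le_pow_right (by norm_num) hk
                omega
              calc 1 ≤ 2 * cur.length := by omega
              _ = 2 * cur.length * 1 := by ring
              _ ≤ 2 * cur.length * (2 ^ k - 1) := Nat.mul_le_mul_left _ hck
            simp [List.length_drop]
            omega
          simp only [restore_haar_rec, restore_haar_alt_loop, if_pos hklt, hpass]
          rw [if_neg hnonempty, hsnd]
          exact ih f (restore_haar_pass cur (d.drop pos)).1 (pos + cur.length) (by omega) (by omega)
            (by omega) (by rw [hlen2]; omega)
        · -- k = 0: last pass; A returns, B's loop exits next iteration (or fuel 0)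
          have hk0 : k = 0 := by omega
          subst hk0
          have hdl : d.length - pos = cur.length := by simpa using hlen
          have hempty : (restore_haar_pass cur (d.drop pos)).2.length = 0 := by
            rw [hsnd]; simp [List.length_drop]; omega
          simp only [restore_haar_rec, restore_haar_alt_loop, if_pos hklt, hpass]
          rw [if_pos hempty]
          have hposend : pos + cur.length = d.length := by omega
          have hstop : ∀ g c, restore_haar_alt_loop d g c d.length = c := by
            intro g c
            cases g with
            | zero => simp [restore_haar_alt_loop]
            | succ g => simp [restore_haar_alt_loop]
          have h2 : (restore_haar_pass cur (d.drop pos)).2 = [] :=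
            List.eq_nil_of_length_eq_zero hempty
          rw [hposend, hstop, Prod.ext_iff]
          exact ⟨rfl, h2⟩

-- ===== VERDICT (by name: the statement is the Claim_ definition above) =====
theorem restore_haar_spec : Claim_equal_restore_haar := by
  intro l d _ hpre
  obtain ⟨k, hk2, hk1, hlen⟩ := hpre
  unfold Spec_restore_haar restore_haar restore_haar_alt
  have := main_lemma d k (d.length + 1) l 0 (by omega) hk1 (by omega) (by simpa using hlen)
  simpa using this
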